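-- pv_equiv track=rewrite | github.com/qomra/km | reference_python_code/km.py | split_by_period
-- ===== SOURCE A (Python) =====
-- def split_by_period(text):
--     """
--     Splits text by periods except those within parentheses.
--
--     Args:
--         text (str): Input text to be split
--
--     Returns:
--         list: List of sentences, with whitespace stripped
--     """
--     results = []
--     current_sentence = ""
--     paren_count = 0
--
--     for char in text:
--         current_sentence += char
--
--         if char == '(':
--             paren_count += 1
--         elif char == ')':
--             paren_count = max(0, paren_count - 1)  # Prevent negative count
--         elif char == '.' and paren_count == 0:
--             # Only split if we're not inside parentheses
--             results.append(current_sentence.strip())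
--             current_sentence = ""
--
--     # Add the last sentence if it doesn't end with a period
--     if current_sentence.strip():
--         results.append(current_sentence.strip())
--
--     return results
-- ===== SOURCE B (Python) =====
-- def split_by_period(text):
--     """
--     Splits text by periods except those within parentheses.
--
--     Two phases instead of character-by-character accumulation: first collect
--     the indices of top-level periods, then cut the text into slices at them.
--     """
--     chars = list(text)
--     cuts = []
--     depth = 0
--     for i, ch in enumerate(chars):
--         if ch == '(':
--             depth += 1
--         elif ch == ')':
--             depth = max(0, depth - 1)
--         elif ch == '.' and depth == 0:
--             cuts.append(i)
--     results = []
--     prev = 0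
--     for i in cuts:
--         results.append(''.join(chars[prev:i + 1]).strip())
--         prev = i + 1
--     tail = ''.join(chars[prev:]).strip()
--     if tail:
--         results.append(tail)
--     return results
-- ===== Notes on version B (the rewrite author's own statement) =====
-- stated objective: alternative
-- what changed: B replaces A's single pass that grows a current-sentence buffer with two phases: one scan collecting the indices of top-level periods, then slicing the text at those indices.
import Mathlib
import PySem

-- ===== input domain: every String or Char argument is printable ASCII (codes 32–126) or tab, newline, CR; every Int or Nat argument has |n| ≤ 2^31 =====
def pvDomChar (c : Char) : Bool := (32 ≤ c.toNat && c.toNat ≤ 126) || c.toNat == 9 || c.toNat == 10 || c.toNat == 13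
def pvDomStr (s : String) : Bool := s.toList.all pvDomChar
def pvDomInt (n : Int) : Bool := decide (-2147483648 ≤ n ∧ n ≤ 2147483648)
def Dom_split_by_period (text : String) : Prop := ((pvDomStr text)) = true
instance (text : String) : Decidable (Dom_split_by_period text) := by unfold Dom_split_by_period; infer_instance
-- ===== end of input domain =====

-- B replaces A's single pass growing a current-sentence buffer with two phases (collect top-level
-- period indices, then slice); alternative decomposition, same cost.


-- ===== PORT A =====
-- loop body of A: state = (results, current_sentence, paren_count)
def stepA (st : List String × List Char × Int) (c : Char) : List String × List Char × Int :=
  let cur := st.2.1 ++ [c]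
  if c = '(' then (st.1, cur, st.2.2 + 1)
  else if c = ')' then (st.1, cur, max 0 (st.2.2 - 1))
  else if c = '.' ∧ st.2.2 = 0 then
    (st.1 ++ [String.ofList (PySem.Chars.strip cur)], [], st.2.2)
  else (st.1, cur, st.2.2)

-- A's trailing "if current_sentence.strip(): results.append(...)"
def finA (st : List String × List Char × Int) : List String :=
  if PySem.Chars.strip st.2.1 ≠ [] then st.1 ++ [String.ofList (PySem.Chars.strip st.2.1)] else st.1

def split_by_period (text : String) : List String :=
  finA (text.toList.foldl stepA ([], [], 0))

-- ===== PORT B =====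
-- phase 1 body: state = (cuts, depth)
def stepCut (st : List Int × Int) (ic : Int × Char) : List Int × Int :=
  if ic.2 = '(' then (st.1, st.2 + 1)
  else if ic.2 = ')' then (st.1, max 0 (st.2 - 1))
  else if ic.2 = '.' ∧ st.2 = 0 then (st.1 ++ [ic.1], st.2)
  else st

-- phase 2 body: state = (results, prev)
def stepSlice (cs : List Char) (st : List String × Int) (i : Int) : List String × Int :=
  (st.1 ++ [String.ofList (PySem.Chars.strip (PySem.List.slice cs (some st.2) (some (i + 1))))], i + 1)

-- B's trailing "tail = ''.join(chars[prev:]).strip(); if tail: results.append(tail)"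
def finB (cs : List Char) (st : List String × Int) : List String :=
  let tail := PySem.Chars.strip (PySem.List.slice cs (some st.2) none)
  if tail ≠ [] then st.1 ++ [String.ofList tail] else st.1

def split_by_period_alt (text : String) : List String :=
  let cs := text.toList
  let c1 := (PySem.List.enumerate cs 0).foldl stepCut ([], 0)
  finB cs (c1.1.foldl (stepSlice cs) ([], 0))

-- ===== PRECONDITION & SPEC =====
def Spec_split_by_period (text : String) (out : List String) : Prop := out = split_by_period_alt text
instance (text : String) (out : List String) : Decidable (Spec_split_by_period text out) := by unfold Spec_split_by_period; infer_instance

-- ===== CLAIM (what is proved, stated in full; the proofs are below) =====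
def Claim_equal_split_by_period : Prop := ∀ (text : String), Dom_split_by_period text → Spec_split_by_period text (split_by_period text)

-- ===== LEMMAS AND PROOFS =====

-- common description of the split: the raw segments (each carrying its top-level period), last one open
def consHead (c : Char) : List (List Char) → List (List Char)
  | [] => [[c]]
  | s :: ss => (c :: s) :: ss

def prehead (pre : List Char) : List (List Char) → List (List Char)
  | [] => [pre]
  | s :: ss => (pre ++ s) :: ss

def segs : List Char → Int → List (List Char)
  | [], _ => [[]]
  | c :: rest, d =>
    if c = '(' then consHead c (segs rest (d + 1))
    else if c = ')' then consHead c (segs rest (max 0 (d - 1)))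
    else if c = '.' ∧ d = 0 then [c] :: segs rest d
    else consHead c (segs rest d)

def finish : List (List Char) → List String
  | [] => []
  | [s] => if PySem.Chars.strip s ≠ [] then [String.ofList (PySem.Chars.strip s)] else []
  | s :: ss => String.ofList (PySem.Chars.strip s) :: finish ss

def cutsF : List Char → Nat → Int → List Int
  | [], _, _ => []
  | c :: rest, p, d =>
    if c = '(' then cutsF rest (p + 1) (d + 1)
    else if c = ')' then cutsF rest (p + 1) (max 0 (d - 1))
    else if c = '.' ∧ d = 0 then ((p : Int)) :: cutsF rest (p + 1) d
    else cutsF rest (p + 1) d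

theorem consHead_ne_nil (c : Char) (ss : List (List Char)) : consHead c ss ≠ [] := by
  cases ss <;> simp [consHead]

theorem segs_ne_nil (l : List Char) (d : Int) : segs l d ≠ [] := by
  cases l with
  | nil => simp [segs]
  | cons c rest =>
    unfold segs
    split_ifs <;> first | exact consHead_ne_nil _ _ | simp

theorem prehead_consHead (pre : List Char) (c : Char) (ss : List (List Char)) :
    prehead pre (consHead c ss) = prehead (pre ++ [c]) ss := by
  cases ss <;> simp [prehead, consHead]

theorem prehead_nil_of_ne (ss : List (List Char)) (h : ss ≠ []) : prehead [] ss = ss := by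
  cases ss with
  | nil => exact absurd rfl h
  | cons s ss => simp [prehead]

theorem finish_cons (s : List Char) (ss : List (List Char)) (h : ss ≠ []) :
    finish (s :: ss) = String.ofList (PySem.Chars.strip s) :: finish ss := by
  cases ss with
  | nil => exact absurd rfl h
  | cons a t => rfl

theorem A_loop (l : List Char) : ∀ (res : List String) (cur : List Char) (d : Int),
    finA (l.foldl stepA (res, cur, d)) = res ++ finish (prehead cur (segs l d)) := by
  induction l with
  | nil =>
    intro res cur d
    simp only [List.foldl_nil, finA, segs, prehead, finish, List.append_nil]
    split_ifs <;> simp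
  | cons c rest ih =>
    intro res cur d
    simp only [List.foldl_cons, stepA, segs]
    split_ifs with h1 h2 h3
    · rw [ih, prehead_consHead]
    · rw [ih, prehead_consHead]
    · rw [ih, prehead_nil_of_ne _ (segs_ne_nil _ _),
          show prehead cur ([c] :: segs rest d) = (cur ++ [c]) :: segs rest d from rfl,
          finish_cons _ _ (segs_ne_nil _ _)]
      simp
    · rw [ih, prehead_consHead]

theorem cuts_loop (l : List Char) : ∀ (acc : List Int) (p : Nat) (d : Int),
    ((PySem.List.enumerate l (p : Int)).foldl stepCut (acc, d)).1 = acc ++ cutsF l p d := by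
  induction l with
  | nil =>
    intro acc p d
    simp [PySem.List.enumerate_nil, cutsF]
  | cons c rest ih =>
    intro acc p d
    rw [PySem.List.enumerate_cons]
    have hp : (p : Int) + 1 = ((p + 1 : Nat) : Int) := by push_cast; ring
    simp only [List.foldl_cons, stepCut, cutsF]
    split_ifs with h1 h2 h3
    · rw [hp, ih]
    · rw [hp, ih]
    · rw [hp, ih]; simp
    · rw [hp, ih]

theorem B_loop (cs : List Char) (l : List Char) : ∀ (d : Int) (p q : Nat) (res0 : List String),
    q ≤ p → cs.drop p = l →
    finB cs ((cutsF l p d).foldl (stepSlice cs) (res0, (q : Int)))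
      = res0 ++ finish (prehead (PySem.List.slice cs (some (q : Int)) (some (p : Int))) (segs l d)) := by
  induction l with
  | nil =>
    intro d p q res0 hqp hdrop
    have hlen : cs.length ≤ p := by
      have := congrArg List.length hdrop
      simp at this
      omega
    simp only [cutsF, List.foldl_nil, finB, PySem.List.slice_natCast,
      PySem.List.slice_from_natCast, segs, prehead, finish, List.append_nil]
    rw [List.take_of_length_le (by simp; omega)]
    split_ifs <;> simp
  | cons c rest ih =>
    intro d p q res0 hqp hdrop
    have hplen : p < cs.length := by
      have := congrArg List.length hdrop
      simp at this
      omega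
    have hgetp : cs[p] = c := by
      have h0 := congrArg (fun t => t[0]?) hdrop
      simp only [List.getElem?_drop, Nat.add_zero] at h0
      simpa [List.getElem?_eq_getElem hplen] using h0
    have hdrop1 : cs.drop (p + 1) = rest := by
      have ht : (cs.drop p).tail = rest := by rw [hdrop]; rfl
      rw [← List.tail_drop, ht]
    have hext : (cs.drop q).take (p + 1 - q) = (cs.drop q).take (p - q) ++ [c] := by
      rw [show p + 1 - q = (p - q) + 1 by omega, List.take_add_one]
      have hg : (cs.drop q)[p - q]? = some c := by
        rw [List.getElem?_drop, show q + (p - q) = p by omega,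
          List.getElem?_eq_getElem hplen, hgetp]
      rw [hg]
      rfl
    have hslice : PySem.List.slice cs (some (q : Int)) (some ((p + 1 : Nat) : Int))
        = PySem.List.slice cs (some (q : Int)) (some ((p : Nat) : Int)) ++ [c] := by
      simp only [PySem.List.slice_natCast]
      exact hext
    have hp1 : (p : Int) + 1 = ((p + 1 : Nat) : Int) := by push_cast; ring
    simp only [cutsF, segs]
    split_ifs with h1 h2 h3
    · rw [ih _ _ q res0 (by omega) hdrop1, hslice, prehead_consHead]
    · rw [ih _ _ q res0 (by omega) hdrop1, hslice, prehead_consHead]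
    · rw [List.foldl_cons]
      simp only [stepSlice]
      rw [hp1, ih d (p + 1) (p + 1) _ (le_refl _) hdrop1]
      have hz : ∀ i : Int, PySem.List.slice cs (some i) (some i) = [] := fun i =>
        List.eq_nil_of_length_eq_zero (by rw [PySem.List.length_slice]; omega)
      rw [hz, prehead_nil_of_ne _ (segs_ne_nil _ _),
        show prehead (PySem.List.slice cs (some (q : Int)) (some ((p : Nat) : Int)))
            ([c] :: segs rest d)
          = (PySem.List.slice cs (some (q : Int)) (some ((p : Nat) : Int)) ++ [c]) :: segs rest d
          from rfl,
        finish_cons _ _ (segs_ne_nil _ _), ← hslice]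
      simp
    · rw [ih _ _ q res0 (by omega) hdrop1, hslice, prehead_consHead]

-- ===== VERDICT (by name: the statement is the Claim_ definition above) =====
theorem split_by_period_spec : Claim_equal_split_by_period := by
  intro text _
  show split_by_period text = split_by_period_alt text
  have h0 : ((0 : Nat) : Int) = 0 := by norm_num
  have hc := cuts_loop text.toList [] 0 0
  have hB := B_loop text.toList text.toList 0 0 0 [] (le_refl 0) List.drop_zero
  have hz : PySem.List.slice text.toList (some (0 : Int)) (some (0 : Int)) = [] :=
    List.eq_nil_of_length_eq_zero (by rw [PySem.List.length_slice]; omega)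
  rw [h0] at hc hB
  rw [List.nil_append] at hc
  rw [hz, prehead_nil_of_ne _ (segs_ne_nil _ _)] at hB
  simp only [split_by_period, split_by_period_alt]
  rw [A_loop text.toList [] [] 0, prehead_nil_of_ne _ (segs_ne_nil _ _), hc, hB]
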